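-- pv_equiv track=rewrite | github.com/freewings463/langflow | src/lfx/src/lfx/graph/graph/utils.py | find_cycle_edge
-- ===== SOURCE A (Python) =====
-- from collections import defaultdict, deque
--
-- def find_cycle_edge(entry_point: str, edges: list[tuple[str, str]]) -> tuple[str, str]:
--     """从入口点查找导致环的边。"""
--     # 注意：使用 DFS 回溯找出回边。
--     graph = defaultdict(list)
--     for u, v in edges:
--         graph[u].append(v)
--
--     def dfs(v, visited, rec_stack):
--         visited.add(v)
--         rec_stack.add(v)
--
--         for neighbor in graph[v]:
--             if neighbor not in visited:
--                 result = dfs(neighbor, visited, rec_stack)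
--                 if result:
--                     return result
--             elif neighbor in rec_stack:
--                 return (v, neighbor)  # 注意：该边构成回路。
--
--         rec_stack.remove(v)
--         return None
--
--     visited: set[str] = set()
--     rec_stack: set[str] = set()
--
--     return dfs(entry_point, visited, rec_stack)
-- ===== SOURCE B (Python) =====
-- from collections import deque
--
--
-- def find_cycle_edge(entry_point: str, edges: list[tuple[str, str]]):
--     graph = {}
--     for u, v in edges:
--         graph.setdefault(u, []).append(v)
--
--     visited = {entry_point}
--     rec_stack = {entry_point}
--     stack = [(entry_point, deque(graph.get(entry_point, [])))]
--
--     while stack: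
--         node, nbrs = stack[-1]
--         if nbrs:
--             n = nbrs.popleft()
--             if n not in visited:
--                 visited.add(n)
--                 rec_stack.add(n)
--                 stack.append((n, deque(graph.get(n, []))))
--             elif n in rec_stack:
--                 return (node, n)
--         else:
--             rec_stack.discard(node)
--             stack.pop()
--     return None
-- ===== Notes on version B (the rewrite author's own statement) =====
-- stated objective: alternative
-- what changed: A's recursive DFS (nested dfs calls with shared visited/rec_stack sets) is replaced by an iterative DFS driven by an explicit stack of (node, pending-neighbours-deque) frames, preserving the exact traversal order and first back edge while using no recursion.
import Mathlib
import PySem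

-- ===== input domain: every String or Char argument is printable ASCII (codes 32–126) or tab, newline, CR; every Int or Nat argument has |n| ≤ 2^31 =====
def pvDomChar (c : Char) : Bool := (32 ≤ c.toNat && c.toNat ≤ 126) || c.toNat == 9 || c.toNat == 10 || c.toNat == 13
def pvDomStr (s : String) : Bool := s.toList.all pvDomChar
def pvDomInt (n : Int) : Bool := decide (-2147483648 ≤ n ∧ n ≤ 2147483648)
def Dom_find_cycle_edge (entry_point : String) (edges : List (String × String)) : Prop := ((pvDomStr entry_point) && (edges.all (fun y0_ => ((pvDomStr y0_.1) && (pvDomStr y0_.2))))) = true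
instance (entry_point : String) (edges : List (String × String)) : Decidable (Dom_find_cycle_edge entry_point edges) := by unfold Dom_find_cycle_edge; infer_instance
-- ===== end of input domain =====

-- B replaces A's recursive DFS by an iterative DFS over an explicit stack of (node, pending-neighbours)
-- frames (same traversal order, same first back edge); objective: alternative decomposition, no recursion.

-- ===== PORT A =====
-- shared helper: both Pythons build the same adjacency map (defaultdict(list).append / dict.setdefault(...).append)
def buildGraph (edges : List (String × String)) : PySem.Dict String (List String) :=
  edges.foldl (fun d p => d.modify p.1 [] (fun l => l ++ [p.2])) PySem.Dict.empty

-- A's recursive `dfs`: dfsA is the function body (mark visited/rec_stack, loop over neighbours),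
-- goA is the `for neighbor in graph[v]` loop threading the mutated visited/rec_stack sets.
-- `fuel` is only a totality device: at fuel 0 a call returns None with the sets untouched; the
-- initial fuel edges.length + 1 exceeds the DFS depth, so that branch is never taken from the entry call.
-- Python's rec_stack.remove(v) is ported as Set.discard: v is always present there (it was added on entry).
mutual
def dfsA (g : PySem.Dict String (List String)) (fuel : Nat) (v : String)
    (vis rst : PySem.Set String) :
    Option (String × String) × PySem.Set String × PySem.Set String :=
  match fuel with
  | 0 => (none, vis, rst)
  | fuel' + 1 => goA g fuel' v (g.getD v []) (PySem.Set.add vis v) (PySem.Set.add rst v)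
termination_by (fuel, 0, 0)

def goA (g : PySem.Dict String (List String)) (fuel : Nat) (v : String) (ns : List String)
    (vis rst : PySem.Set String) :
    Option (String × String) × PySem.Set String × PySem.Set String :=
  match ns with
  | [] => (none, vis, PySem.Set.discard rst v)
  | n :: rest =>
    if !(PySem.Set.contains vis n) then
      match dfsA g fuel n vis rst with
      | (some e, vis', rst') => (some e, vis', rst')
      | (none, vis', rst') => goA g fuel v rest vis' rst'
    else if PySem.Set.contains rst n then (some (v, n), vis, rst)
    else goA g fuel v rest vis rst
termination_by (fuel, 1, ns.length)
end

def find_cycle_edge (entry_point : String) (edges : List (String × String)) : Option (String × String) :=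
  let g := buildGraph edges
  (dfsA g (edges.length + 1) entry_point PySem.Set.empty PySem.Set.empty).1

-- ===== PORT B =====
-- total length of all neighbour lists stored in g (used only for loopB's termination measure)
def totalLen (g : PySem.Dict String (List String)) : Nat :=
  (g.items.map (fun p => p.2.length)).sum

theorem getD_len_le (g : PySem.Dict String (List String)) (k : String) :
    (g.getD k []).length ≤ totalLen g := by
  unfold PySem.Dict.getD PySem.Dict.get? totalLen
  cases h : List.find? (fun p => p.1 == k) g.items with
  | none => simp
  | some p =>
    have hm := List.mem_of_find?_eq_some h
    simp only [Option.map_some, Option.getD_some]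
    exact List.single_le_sum (by simp) _ (List.mem_map_of_mem hm)

-- termination measure for the explicit stack: Σ (|pending|+1)·(totalLen g + 2)^fuel over the frames
def muB (g : PySem.Dict String (List String)) (stk : List (Nat × String × List String)) : Nat :=
  (stk.map (fun f => (f.2.2.length + 1) * (totalLen g + 2) ^ f.1)).sum

-- B's while-loop: the stack holds (frame fuel, node, pending neighbours in deque order).
-- The frame fuel mirrors dfsA's fuel (child frames get fuel - 1); the fuel-0 skip branch is the
-- totality guard matching dfsA's fuel-0 return and is never taken from find_cycle_edge_alt.
def loopB (g : PySem.Dict String (List String)) (stk : List (Nat × String × List String))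
    (vis rst : PySem.Set String) : Option (String × String) :=
  match stk with
  | [] => none
  | (f, v, ns) :: stk' =>
    match ns with
    | [] => loopB g stk' vis (PySem.Set.discard rst v)
    | n :: rest =>
      if !(PySem.Set.contains vis n) then
        match f with
        | 0 => loopB g ((0, v, rest) :: stk') vis rst
        | f' + 1 =>
          loopB g ((f', n, g.getD n []) :: (f' + 1, v, rest) :: stk')
            (PySem.Set.add vis n) (PySem.Set.add rst n)
      else if PySem.Set.contains rst n then some (v, n)
      else loopB g ((f, v, rest) :: stk') vis rst
termination_by muB g stk
decreasing_by
  · -- pop an exhausted frame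
    simp only [muB, List.map_cons, List.sum_cons, List.length_nil, Nat.zero_add, Nat.one_mul]
    have hp : 0 < (totalLen g + 2) ^ f := Nat.pow_pos (by omega)
    omega
  · -- fuel-guard skip
    simp only [muB, List.map_cons, List.sum_cons, List.length_cons, pow_zero, Nat.mul_one]
    omega
  · -- push a child frame
    simp only [muB, List.map_cons, List.sum_cons, List.length_cons]
    have hp : 0 < (totalLen g + 2) ^ f' := Nat.pow_pos (by omega)
    have hb : (g.getD n []).length + 1 < totalLen g + 2 := by
      have := getD_len_le g n; omega
    have h1 : ((g.getD n []).length + 1) * (totalLen g + 2) ^ f' <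
        (totalLen g + 2) ^ f' * (totalLen g + 2) := by
      calc ((g.getD n []).length + 1) * (totalLen g + 2) ^ f'
          < (totalLen g + 2) * (totalLen g + 2) ^ f' := by
            exact mul_lt_mul_of_pos_right hb hp
        _ = (totalLen g + 2) ^ f' * (totalLen g + 2) := by ring
    have h2 : (totalLen g + 2) ^ (f' + 1) = (totalLen g + 2) ^ f' * (totalLen g + 2) := pow_succ _ _
    have h3 : (rest.length + 1) * ((totalLen g + 2) ^ f' * (totalLen g + 2)) +
        (totalLen g + 2) ^ f' * (totalLen g + 2) =
        (rest.length + 1 + 1) * ((totalLen g + 2) ^ f' * (totalLen g + 2)) := by ring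
    rw [h2]
    omega
  · -- skip an already-visited neighbour
    simp only [muB, List.map_cons, List.sum_cons, List.length_cons]
    have hp : 0 < (totalLen g + 2) ^ f := Nat.pow_pos (by omega)
    have h1 : (rest.length + 1) * (totalLen g + 2) ^ f <
        (rest.length + 1 + 1) * (totalLen g + 2) ^ f :=
      mul_lt_mul_of_pos_right (by omega) hp
    omega

def find_cycle_edge_alt (entry_point : String) (edges : List (String × String)) : Option (String × String) :=
  let g := buildGraph edges
  loopB g [(edges.length, entry_point, g.getD entry_point [])]
    (PySem.Set.ofList [entry_point]) (PySem.Set.ofList [entry_point])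

-- ===== PRECONDITION & SPEC =====
def Spec_find_cycle_edge (entry_point : String) (edges : List (String × String)) (out : Option (String × String)) : Prop := out = find_cycle_edge_alt entry_point edges
instance (entry_point : String) (edges : List (String × String)) (out : Option (String × String)) : Decidable (Spec_find_cycle_edge entry_point edges out) := by unfold Spec_find_cycle_edge; infer_instance

-- ===== CLAIM (what is proved, stated in full; the proofs are below) =====
def Claim_equal_find_cycle_edge : Prop := ∀ (entry_point : String) (edges : List (String × String)), Dom_find_cycle_edge entry_point edges → Spec_find_cycle_edge entry_point edges (find_cycle_edge entry_point edges)

-- ===== LEMMAS AND PROOFS =====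

-- simulation: one stack frame (fuel, v, ns) behaves exactly like A's loop goA fuel v ns,
-- and on a None result the loop resumes with the frames below, using the updated sets.
theorem loopB_eq_goA (g : PySem.Dict String (List String)) :
    ∀ (fuel : Nat) (ns : List String) (v : String) (vis rst : PySem.Set String)
      (stk : List (Nat × String × List String)),
      loopB g ((fuel, v, ns) :: stk) vis rst =
        match goA g fuel v ns vis rst with
        | (some e, _, _) => some e
        | (none, vis', rst') => loopB g stk vis' rst' := by
  intro fuel
  induction fuel with
  | zero =>
    intro ns
    induction ns with
    | nil => intro v vis rst stk; simp [loopB, goA]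
    | cons n rest ih =>
      intro v vis rst stk
      by_cases hv : n ∈ vis
      · by_cases hr : n ∈ rst
        · simp [loopB, goA, hv, hr]
        · simpa [loopB, goA, hv, hr] using ih v vis rst stk
      · simpa [loopB, goA, dfsA, hv] using ih v vis rst stk
  | succ f ihf =>
    intro ns
    induction ns with
    | nil => intro v vis rst stk; simp [loopB, goA]
    | cons n rest ih =>
      intro v vis rst stk
      by_cases hv : n ∈ vis
      · by_cases hr : n ∈ rst
        · simp [loopB, goA, hv, hr]
        · simpa [loopB, goA, hv, hr] using ih v vis rst stk
      · have hL : loopB g ((f + 1, v, n :: rest) :: stk) vis rst =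
            loopB g ((f, n, g.getD n []) :: (f + 1, v, rest) :: stk)
              (PySem.Set.add vis n) (PySem.Set.add rst n) := by
          rw [loopB]; simp [hv]
        rw [hL, ihf]
        have hA : goA g (f + 1) v (n :: rest) vis rst =
            match goA g f n (g.getD n []) (PySem.Set.add vis n) (PySem.Set.add rst n) with
            | (some e, vis', rst') => (some e, vis', rst')
            | (none, vis', rst') => goA g (f + 1) v rest vis' rst' := by
          rw [goA]; simp [hv, dfsA]
        rw [hA]
        cases hgo : goA g f n (g.getD n []) (PySem.Set.add vis n) (PySem.Set.add rst n) with
        | mk r p =>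
          cases r with
          | none => cases p; simpa using ih v _ _ stk
          | some e => cases p; simp

theorem find_cycle_edge_spec' (entry_point : String) (edges : List (String × String)) :
    find_cycle_edge entry_point edges = find_cycle_edge_alt entry_point edges := by
  simp only [find_cycle_edge, find_cycle_edge_alt]
  rw [loopB_eq_goA]
  rw [dfsA]
  have hset : PySem.Set.add PySem.Set.empty entry_point = PySem.Set.ofList [entry_point] := rfl
  rw [hset]
  cases hgo : goA (buildGraph edges) edges.length entry_point
      ((buildGraph edges).getD entry_point []) (PySem.Set.ofList [entry_point])
      (PySem.Set.ofList [entry_point]) with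
  | mk r p =>
    cases r with
    | none => cases p; simp [loopB]
    | some e => cases p; simp

-- ===== VERDICT (by name: the statement is the Claim_ definition above) =====
theorem find_cycle_edge_spec : Claim_equal_find_cycle_edge := by
  intro entry_point edges _
  exact find_cycle_edge_spec' entry_point edges
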